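-- pv_equiv track=rewrite | github.com/jhidalgo-utep/problem-solving-solutions | data-structures/Leetcode/runner_5.py | largest_double_all_nums
-- ===== SOURCE A (Python) =====
-- import math
--
-- def largest_double_all_nums(nums):
--     first = -math.inf
--     second = -math.inf
--     index = -1
--
--     for i in range( len(nums) ) :
--         if nums[i] > first:
--             second = first
--             first = nums[i]
--             index = i
--
--         elif nums[i] > second:
--             second = nums[i]
--
--     if first >= second*2:
--         return index
--     return -1
-- ===== SOURCE B (Python) =====
-- def largest_double_all_nums(nums):
--     if not nums:
--         return -1
--     largest = max(nums)
--     index = nums.index(largest)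
--     rest = nums[:index] + nums[index + 1:]
--     if not rest or largest >= 2 * max(rest):
--         return index
--     return -1
-- ===== Notes on version B (the rewrite author's own statement) =====
-- stated objective: simpler
-- what changed: Replaces A's single fused scan maintaining (first, second, index) with -inf sentinels by a multi-pass decomposition: max(nums), its first index, then max over the remaining positions, then one comparison.
import Mathlib
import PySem

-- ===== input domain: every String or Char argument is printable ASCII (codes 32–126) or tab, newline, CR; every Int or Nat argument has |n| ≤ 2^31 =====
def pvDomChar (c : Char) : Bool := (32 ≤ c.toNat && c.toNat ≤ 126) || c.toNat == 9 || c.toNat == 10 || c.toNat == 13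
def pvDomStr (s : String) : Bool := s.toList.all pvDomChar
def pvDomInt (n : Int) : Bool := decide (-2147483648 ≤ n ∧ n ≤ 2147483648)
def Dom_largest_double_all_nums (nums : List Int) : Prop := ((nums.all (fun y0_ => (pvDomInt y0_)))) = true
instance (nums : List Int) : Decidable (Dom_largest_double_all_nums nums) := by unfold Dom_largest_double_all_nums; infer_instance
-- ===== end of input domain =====

-- B replaces A's single fused running-(first,second,index) scan by a multi-pass
-- decomposition: max, first index of the max, then max of the remaining positions
-- (objective: simpler; same O(n) cost).

-- ===== PORT A =====
-- -inf is modelled as `none`: `x > -inf` is always true, and the final test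
-- `first >= second*2` is true whenever second = -inf (first is then nums-max or -inf).
def pvGtOpt (x : Int) (o : Option Int) : Bool :=
  match o with
  | none => true
  | some v => decide (v < x)

def pvLoopA : List Int → Option Int → Option Int → Int → Int → Option Int × Option Int × Int
  | [], f, s, idx, _ => (f, s, idx)
  | x :: xs, f, s, idx, i =>
      if pvGtOpt x f then pvLoopA xs (some x) f i (i + 1)
      else if pvGtOpt x s then pvLoopA xs f (some x) idx (i + 1)
      else pvLoopA xs f s idx (i + 1)

def largest_double_all_nums (nums : List Int) : Int :=
  let r := pvLoopA nums none none (-1) 0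
  match r.1, r.2.1 with
  | _, none => r.2.2                 -- first ≥ (-inf)*2 holds
  | none, some _ => -1               -- -inf ≥ finite*2 is false (unreachable)
  | some f, some s => if f ≥ s * 2 then r.2.2 else -1

-- ===== PORT B =====
def largest_double_all_nums_alt (nums : List Int) : Int :=
  if nums = [] then -1
  else
    match PySem.List.max? nums (fun y => y) with
    | none => -1                                    -- unreachable: nums ≠ []
    | some largest =>
      let index : Nat := (PySem.List.index? nums largest).getD 0   -- largest ∈ nums, so index? is some
      let rest := PySem.List.slice nums none (some (index : Int)) ++
                  PySem.List.slice nums (some ((index : Int) + 1)) none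
      if rest = [] then (index : Int)
      else
        match PySem.List.max? rest (fun y => y) with
        | none => (index : Int)                     -- unreachable: rest ≠ []
        | some s => if largest ≥ 2 * s then (index : Int) else -1

-- ===== PRECONDITION & SPEC =====
def Spec_largest_double_all_nums (nums : List Int) (out : Int) : Prop := out = largest_double_all_nums_alt nums
instance (nums : List Int) (out : Int) : Decidable (Spec_largest_double_all_nums nums out) := by unfold Spec_largest_double_all_nums; infer_instance

-- ===== CLAIM (what is proved, stated in full; the proofs are below) =====
def Claim_equal_largest_double_all_nums : Prop := ∀ (nums : List Int), Dom_largest_double_all_nums nums → Spec_largest_double_all_nums nums (largest_double_all_nums nums)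

-- ===== LEMMAS AND PROOFS =====

-- index (as Option Nat) of the first occurrence of the maximum
def specIdx (l : List Int) : Option Nat :=
  match l.max? with
  | none => none
  | some m => PySem.List.index? l m

-- max over the positions other than the first position of the maximum
def specS (l : List Int) : Option Int :=
  match specIdx l with
  | none => none
  | some k => (l.eraseIdx k).max?

lemma pysem_max?_eq (l : List Int) : PySem.List.max? l (fun y => y) = l.max? := by
  cases l with
  | nil => simp [PySem.List.max?]
  | cons x t => rw [PySem.List.max?_id_cons, List.max?_cons']

lemma loopA_append (xs : List Int) (x : Int) (f s : Option Int) (idx i : Int) :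
    pvLoopA (xs ++ [x]) f s idx i =
      (let r := pvLoopA xs f s idx i
       if pvGtOpt x r.1 then (some x, r.1, i + (xs.length : Int))
       else if pvGtOpt x r.2.1 then (r.1, some x, r.2.2)
       else r) := by
  induction xs generalizing f s idx i with
  | nil => simp [pvLoopA]
  | cons y ys ih =>
      have harith : i + 1 + (ys.length : Int) = i + ((y :: ys).length : Int) := by
        simp; ring
      simp only [List.cons_append, pvLoopA]
      split_ifs <;> rw [ih, harith] <;> simp_all

lemma loopA_spec (l : List Int) :
    pvLoopA l none none (-1) 0 =
      (l.max?, specS l, (specIdx l).elim (-1) (fun k => (k : Int))) := by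
  induction l using List.reverseRecOn with
  | nil => simp [pvLoopA, specIdx, specS]
  | append_singleton ys x ih =>
      rw [loopA_append, ih]
      by_cases hgt : pvGtOpt x ys.max? = true
      · -- x strictly greater than everything in ys
        have hlt : ∀ b ∈ ys, b < x := by
          intro b hb
          cases hmax : ys.max? with
          | none => exact absurd (List.max?_eq_none_iff.mp hmax ▸ hb) (List.not_mem_nil)
          | some m =>
              have hbm : b ≤ m := (List.max?_eq_some_iff.mp hmax).2 b hb
              have : m < x := by simpa [pvGtOpt, hmax] using hgt
              omega
        have hnotmem : x ∉ ys := fun h => lt_irrefl x (hlt x h)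
        have hmax' : (ys ++ [x]).max? = some x := by
          rw [List.max?_eq_some_iff]
          constructor
          · simp
          · intro b hb
            rcases List.mem_append.mp hb with h | h
            · exact le_of_lt (hlt b h)
            · simp at h; omega
        have hidx' : specIdx (ys ++ [x]) = some ys.length := by
          simp only [specIdx, hmax']
          exact PySem.List.index?_append_singleton_self ys x hnotmem
        have herase : (ys ++ [x]).eraseIdx ys.length = ys := by
          rw [List.eraseIdx_eq_take_drop_succ]
          simp
        have hS' : specS (ys ++ [x]) = ys.max? := by
          simp only [specS, hidx', herase]
        simp only [hgt, if_true]
        rw [hmax', hS', hidx']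
        simp
      · -- ys has a max m with x ≤ m
        have hm : ∃ m, ys.max? = some m ∧ x ≤ m := by
          cases hmax : ys.max? with
          | none => exact absurd (by simp [pvGtOpt, hmax]) hgt
          | some m =>
              refine ⟨m, rfl, ?_⟩
              by_contra h
              exact hgt (by simp [pvGtOpt, hmax]; omega)
        obtain ⟨m, hmax, hxm⟩ := hm
        obtain ⟨hmem, hbound⟩ := List.max?_eq_some_iff.mp hmax
        obtain ⟨k, hk⟩ := Option.isSome_iff_exists.mp ((PySem.List.index?_isSome_iff _ _).mpr hmem)
        obtain ⟨pre, suf, hsplit, hpre, _⟩ := (PySem.List.index?_eq_some_iff _ _ _).mp hk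
        have hklt : k < ys.length := by
          subst hpre; rw [hsplit]; simp
        have hmax' : (ys ++ [x]).max? = some m := by
          rw [List.max?_eq_some_iff]
          constructor
          · exact List.mem_append.mpr (Or.inl hmem)
          · intro b hb
            rcases List.mem_append.mp hb with h | h
            · exact hbound b h
            · simp at h; omega
        have hidx' : specIdx (ys ++ [x]) = some k := by
          simp only [specIdx, hmax']
          rw [PySem.List.index?_append_of_mem _ hmem, hk]
        have herase : (ys ++ [x]).eraseIdx k = ys.eraseIdx k ++ [x] :=
          List.eraseIdx_append_of_lt_length hklt _
        have hSold : specS ys = (ys.eraseIdx k).max? := by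
          simp only [specS, specIdx, hmax, hk]
        have hgt' : pvGtOpt x ys.max? = false := by simpa using hgt
        have hIdxOld : specIdx ys = some k := by simp only [specIdx, hmax, hk]
        have hSnew : specS (ys ++ [x]) = (ys.eraseIdx k ++ [x]).max? := by
          simp only [specS, hidx', herase]
        have hS' : specS (ys ++ [x]) =
            (if pvGtOpt x (specS ys) then some x else specS ys) := by
          rw [hSnew, hSold]
          cases hrs : (ys.eraseIdx k).max? with
          | none =>
              have : ys.eraseIdx k = [] := List.max?_eq_none_iff.mp hrs
              simp [this, pvGtOpt]
          | some s =>
              obtain ⟨hsmem, hsbound⟩ := List.max?_eq_some_iff.mp hrs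
              by_cases hxs : s < x
              · have : (ys.eraseIdx k ++ [x]).max? = some x := by
                  rw [List.max?_eq_some_iff]
                  refine ⟨by simp, ?_⟩
                  intro b hb
                  rcases List.mem_append.mp hb with h | h
                  · have := hsbound b h; omega
                  · simp at h; omega
                simp [this, pvGtOpt, hxs]
              · have : (ys.eraseIdx k ++ [x]).max? = some s := by
                  rw [List.max?_eq_some_iff]
                  refine ⟨List.mem_append.mpr (Or.inl hsmem), ?_⟩
                  intro b hb
                  rcases List.mem_append.mp hb with h | h
                  · exact hsbound b h
                  · simp at h; omega
                simp [this, pvGtOpt, hxs]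
        simp only [hgt', Bool.false_eq_true, if_false]
        rw [hmax', hidx', hS', hIdxOld]
        by_cases h2 : pvGtOpt x (specS ys) = true <;> simp [h2, hmax]

lemma main_eq (nums : List Int) :
    largest_double_all_nums nums = largest_double_all_nums_alt nums := by
  cases hnil : nums with
  | nil => simp [largest_double_all_nums, largest_double_all_nums_alt, pvLoopA]
  | cons a t =>
      rw [← hnil]
      have hne : nums ≠ [] := by rw [hnil]; simp
      obtain ⟨m, hmax⟩ : ∃ m, nums.max? = some m := by
        cases h : nums.max? with
        | none => exact absurd (List.max?_eq_none_iff.mp h) hne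
        | some m => exact ⟨m, rfl⟩
      obtain ⟨hmem, _⟩ := List.max?_eq_some_iff.mp hmax
      obtain ⟨k, hk⟩ := Option.isSome_iff_exists.mp ((PySem.List.index?_isSome_iff _ _).mpr hmem)
      have hS : specS nums = (nums.eraseIdx k).max? := by
        simp only [specS, specIdx, hmax, hk]
      have hIdx : specIdx nums = some k := by simp only [specIdx, hmax, hk]
      -- unfold A via the loop characterization
      rw [largest_double_all_nums]
      rw [loopA_spec, hIdx, hS]
      -- unfold B
      simp only [largest_double_all_nums_alt, if_neg hne, pysem_max?_eq, hmax, hk,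
        Option.getD_some, Option.elim]
      have hslice : PySem.List.slice nums none (some ((k : Nat) : Int)) ++
          PySem.List.slice nums (some (((k : Nat) : Int) + 1)) none = nums.eraseIdx k := by
        have h1 : ((k : Nat) : Int) + 1 = (((k + 1 : Nat)) : Int) := by push_cast; ring
        rw [PySem.List.slice_to_natCast, h1, PySem.List.slice_from_natCast,
          ← List.eraseIdx_eq_take_drop_succ]
      simp only [hslice]
      cases hrest : (nums.eraseIdx k).max? with
      | none =>
          have hre : nums.eraseIdx k = [] := List.max?_eq_none_iff.mp hrest
          simp [hre]
      | some s =>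
          have hre : nums.eraseIdx k ≠ [] := by
            intro h; rw [h] at hrest; simp at hrest
          rw [if_neg hre]
          by_cases hcmp : m ≥ s * 2
          · have h2 : m ≥ 2 * s := by omega
            simp [hcmp, h2]
          · have h2 : ¬ m ≥ 2 * s := by omega
            simp [hcmp, h2]

-- ===== VERDICT (by name: the statement is the Claim_ definition above) =====
theorem largest_double_all_nums_spec : Claim_equal_largest_double_all_nums := by
  intro nums _
  unfold Spec_largest_double_all_nums
  exact main_eq nums
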